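-- pv_equiv track=rewrite | github.com/leezyli/MarchingCubesLUTGenerator | gen_modified_mc_lut.py | edge_gen_bits_from_vertex_indices
-- ===== SOURCE A (Python) =====
-- vertex2edge = [
--     (0, 3, 8),
--     (0, 1, 9),
--     (1, 2, 10),
--     (2, 3, 11),
--     (4, 7, 8),
--     (4, 5, 9),
--     (5, 6, 10),
--     (6, 7, 11)
-- ]
--
-- def edge_gen_bits_from_vertex_indices(indices):
--     ebits = [0 for k in range(12)]
--     for i in range(len(indices)):
--         vertex_index = indices[i]
--         edges = vertex2edge[vertex_index]
--         ebits[edges[0]] ^= 1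
--         ebits[edges[1]] ^= 1
--         ebits[edges[2]] ^= 1
--     return ebits
-- ===== SOURCE B (Python) =====
-- vertex2edge = [
--     (0, 3, 8),
--     (0, 1, 9),
--     (1, 2, 10),
--     (2, 3, 11),
--     (4, 7, 8),
--     (4, 5, 9),
--     (5, 6, 10),
--     (6, 7, 11)
-- ]
--
-- def edge_gen_bits_from_vertex_indices(indices):
--     # Represent the whole 12-bit parity state as ONE integer bitset:
--     # each vertex contributes a fixed 3-bit mask, and parity is a XOR fold.
--     masks = [(1 << a) | (1 << b) | (1 << c) for (a, b, c) in vertex2edge]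
--     acc = 0
--     for v in indices:
--         acc ^= masks[v]
--     # Unpack the 12-bit accumulator into a list, low bit first.
--     ebits = []
--     for _ in range(12):
--         ebits.append(acc % 2)
--         acc //= 2
--     return ebits
-- ===== Notes on version B (the rewrite author's own statement) =====
-- stated objective: alternative
-- what changed: B replaces A's 12-slot list of XOR-toggled bits by a single integer bitset: each vertex maps to a precomputed 3-bit mask, the loop is one integer XOR per index, and a final divmod loop unpacks the 12 bits into the output list.
import Mathlib
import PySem

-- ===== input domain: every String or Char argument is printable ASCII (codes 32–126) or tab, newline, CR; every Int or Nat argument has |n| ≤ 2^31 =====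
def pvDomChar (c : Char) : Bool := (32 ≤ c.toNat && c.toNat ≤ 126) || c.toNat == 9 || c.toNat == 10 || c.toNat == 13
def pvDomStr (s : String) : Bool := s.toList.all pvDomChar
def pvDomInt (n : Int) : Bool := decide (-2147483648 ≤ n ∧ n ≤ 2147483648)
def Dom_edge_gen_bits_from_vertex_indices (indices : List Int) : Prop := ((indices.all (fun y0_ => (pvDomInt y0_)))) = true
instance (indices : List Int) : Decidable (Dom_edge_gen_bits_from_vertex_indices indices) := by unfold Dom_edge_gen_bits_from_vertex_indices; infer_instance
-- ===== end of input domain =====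

set_option maxHeartbeats 2000000


-- B replaces A's 12-slot bit list by a single integer bitset: one precomputed 3-bit mask per
-- vertex, one XOR fold over the indices, then a divmod loop unpacking the 12 bits.

-- ===== PORT A =====
def vertex2edgeL : List (Int × Int × Int) :=
  [(0, 3, 8), (0, 1, 9), (1, 2, 10), (2, 3, 11), (4, 7, 8), (4, 5, 9), (5, 6, 10), (6, 7, 11)]

-- ebits[e] ^= 1  (read then write at Python index e)
def pvToggle (l : List Int) (e : Int) : List Int :=
  match PySem.List.pyGet? l e with
  | none => l
  | some x => PySem.List.pySetD l e (Int.xor x 1)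

def pvStepA (ebits : List Int) (vi : Int) : List Int :=
  match PySem.List.pyGet? vertex2edgeL vi with
  | none => ebits   -- Python raises IndexError here; excluded by Pre_
  | some (e0, e1, e2) => pvToggle (pvToggle (pvToggle ebits e0) e1) e2

def edge_gen_bits_from_vertex_indices (indices : List Int) : List Int :=
  indices.foldl pvStepA (List.replicate 12 0)

-- ===== PORT B =====
-- masks = [(1 << a) | (1 << b) | (1 << c) for (a, b, c) in vertex2edge]
def pvMasks : List Int :=
  vertex2edgeL.map (fun t =>
    Int.lor (Int.lor ((1:Int) <<< t.1) ((1:Int) <<< t.2.1)) ((1:Int) <<< t.2.2))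

-- acc ^= masks[v]
def pvXorStep (acc : Int) (v : Int) : Int :=
  match PySem.List.pyGet? pvMasks v with
  | none => acc   -- Python raises IndexError here; excluded by Pre_
  | some m => Int.xor acc m

-- the 12-iteration unpacking loop: append acc % 2, then acc //= 2
def pvUnpack : Nat → Int → List Int
  | 0, _ => []
  | k + 1, acc => PySem.Int.mod acc 2 :: pvUnpack k (PySem.Int.floordiv acc 2)

def edge_gen_bits_from_vertex_indices_alt (indices : List Int) : List Int :=
  pvUnpack 12 (indices.foldl pvXorStep 0)

-- ===== PRECONDITION & SPEC =====
-- Pre_ excludes exactly the inputs on which both Pythons raise IndexError at the table lookup.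
def Pre_edge_gen_bits_from_vertex_indices (indices : List Int) : Prop :=
  ∀ v ∈ indices, PySem.Raise.InRange 8 v
instance (indices : List Int) : Decidable (Pre_edge_gen_bits_from_vertex_indices indices) := by
  unfold Pre_edge_gen_bits_from_vertex_indices; infer_instance

def pvWitness_edge_gen_bits_from_vertex_indices : List Int := [0, 1, 2, -1, 7]

def Spec_edge_gen_bits_from_vertex_indices (indices : List Int) (out : List Int) : Prop :=
  out = edge_gen_bits_from_vertex_indices_alt indices
instance (indices : List Int) (out : List Int) : Decidable (Spec_edge_gen_bits_from_vertex_indices indices out) := by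
  unfold Spec_edge_gen_bits_from_vertex_indices; infer_instance

-- ===== CLAIM (what is proved, stated in full; the proofs are below) =====
def Claim_equal_edge_gen_bits_from_vertex_indices : Prop :=
  ∀ (indices : List Int), Dom_edge_gen_bits_from_vertex_indices indices →
    Pre_edge_gen_bits_from_vertex_indices indices →
    Spec_edge_gen_bits_from_vertex_indices indices (edge_gen_bits_from_vertex_indices indices)

-- ===== LEMMAS AND PROOFS =====

-- the 12 parity bits of a nonnegative accumulator, low bit first
def pvBitsOfN (n : Nat) : List Int :=
  (List.range 12).map (fun i => if n.testBit i then 1 else 0)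

lemma pvUnpack_natCast (k : Nat) (n : Nat) :
    pvUnpack k (n : Int) = (List.range k).map (fun i => if n.testBit i then (1:Int) else 0) := by
  induction k generalizing n with
  | zero => rfl
  | succ k ih =>
    have hm : PySem.Int.mod (n:Int) 2 = ((n % 2 : Nat) : Int) := by
      exact_mod_cast PySem.Int.mod_natCast n 2
    have hd : PySem.Int.floordiv (n:Int) 2 = ((n / 2 : Nat) : Int) := by
      exact_mod_cast PySem.Int.floordiv_natCast n 2
    rw [pvUnpack, hm, hd, ih, List.range_succ_eq_map, List.map_cons, List.map_map]
    congr 1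
    · rcases Nat.mod_two_eq_zero_or_one n with h | h <;> simp [Nat.testBit_zero, h]
    · apply List.map_congr_left
      intro i _
      simp [Function.comp, Nat.testBit_succ]

lemma pvToggle_bitsOfN (e : Nat) (he : e < 12) (n : Nat) :
    pvToggle (pvBitsOfN n) (e : Int) = pvBitsOfN (n ^^^ 2 ^ e) := by
  have hget : PySem.List.pyGet? (pvBitsOfN n) (e : Int)
      = some (if n.testBit e then 1 else 0) := by
    rw [PySem.List.pyGet?_natCast]
    simp [pvBitsOfN, he]
  unfold pvToggle
  rw [hget]
  simp only []
  rw [PySem.List.pySetD_natCast]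
  apply List.ext_getElem
  · simp [pvBitsOfN]
  · intro i hi1 hi2
    simp only [pvBitsOfN, List.getElem_set, List.getElem_map, List.getElem_range,
      Nat.testBit_xor, Nat.testBit_two_pow]
    by_cases hie : e = i
    · subst hie
      cases h : n.testBit e <;> simp <;> decide
    · simp [hie]

lemma pvTriple_bitsOfN (e0 e1 e2 : Nat) (h0 : e0 < 12) (h1 : e1 < 12) (h2 : e2 < 12) (n : Nat) :
    pvToggle (pvToggle (pvToggle (pvBitsOfN n) (e0 : Int)) (e1 : Int)) (e2 : Int)
      = pvBitsOfN (n ^^^ (2 ^ e0 ^^^ (2 ^ e1 ^^^ 2 ^ e2))) := by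
  rw [pvToggle_bitsOfN e0 h0, pvToggle_bitsOfN e1 h1, pvToggle_bitsOfN e2 h2,
      Nat.xor_assoc, Nat.xor_assoc]

-- one loop step on both sides: A toggles the three edge bits, B XORs the vertex mask
lemma pvStep_pair (v : Int) (hv : PySem.Raise.InRange 8 v) (n : Nat) :
    ∃ m : Nat, pvStepA (pvBitsOfN n) v = pvBitsOfN (n ^^^ m)
      ∧ pvXorStep (n : Int) v = ((n ^^^ m : Nat) : Int) := by
  obtain ⟨hlo, hhi⟩ : -8 ≤ v ∧ v < 8 := by simpa [PySem.Raise.InRange] using hv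
  interval_cases v
  · exact ⟨265, by
      show pvToggle (pvToggle (pvToggle (pvBitsOfN n) 0) 3) 8 = pvBitsOfN (n ^^^ 265)
      have h := pvTriple_bitsOfN 0 3 8 (by norm_num) (by norm_num) (by norm_num) n
      norm_num at h
      convert h using 2, rfl⟩
  · exact ⟨515, by
      show pvToggle (pvToggle (pvToggle (pvBitsOfN n) 0) 1) 9 = pvBitsOfN (n ^^^ 515)
      have h := pvTriple_bitsOfN 0 1 9 (by norm_num) (by norm_num) (by norm_num) n
      norm_num at h
      convert h using 2, rfl⟩
  · exact ⟨1030, by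
      show pvToggle (pvToggle (pvToggle (pvBitsOfN n) 1) 2) 10 = pvBitsOfN (n ^^^ 1030)
      have h := pvTriple_bitsOfN 1 2 10 (by norm_num) (by norm_num) (by norm_num) n
      norm_num at h
      convert h using 2, rfl⟩
  · exact ⟨2060, by
      show pvToggle (pvToggle (pvToggle (pvBitsOfN n) 2) 3) 11 = pvBitsOfN (n ^^^ 2060)
      have h := pvTriple_bitsOfN 2 3 11 (by norm_num) (by norm_num) (by norm_num) n
      norm_num at h
      convert h using 2, rfl⟩
  · exact ⟨400, by
      show pvToggle (pvToggle (pvToggle (pvBitsOfN n) 4) 7) 8 = pvBitsOfN (n ^^^ 400)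
      have h := pvTriple_bitsOfN 4 7 8 (by norm_num) (by norm_num) (by norm_num) n
      norm_num at h
      convert h using 2, rfl⟩
  · exact ⟨560, by
      show pvToggle (pvToggle (pvToggle (pvBitsOfN n) 4) 5) 9 = pvBitsOfN (n ^^^ 560)
      have h := pvTriple_bitsOfN 4 5 9 (by norm_num) (by norm_num) (by norm_num) n
      norm_num at h
      convert h using 2, rfl⟩
  · exact ⟨1120, by
      show pvToggle (pvToggle (pvToggle (pvBitsOfN n) 5) 6) 10 = pvBitsOfN (n ^^^ 1120)
      have h := pvTriple_bitsOfN 5 6 10 (by norm_num) (by norm_num) (by norm_num) n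
      norm_num at h
      convert h using 2, rfl⟩
  · exact ⟨2240, by
      show pvToggle (pvToggle (pvToggle (pvBitsOfN n) 6) 7) 11 = pvBitsOfN (n ^^^ 2240)
      have h := pvTriple_bitsOfN 6 7 11 (by norm_num) (by norm_num) (by norm_num) n
      norm_num at h
      convert h using 2, rfl⟩
  · exact ⟨265, by
      show pvToggle (pvToggle (pvToggle (pvBitsOfN n) 0) 3) 8 = pvBitsOfN (n ^^^ 265)
      have h := pvTriple_bitsOfN 0 3 8 (by norm_num) (by norm_num) (by norm_num) n
      norm_num at h
      convert h using 2, rfl⟩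
  · exact ⟨515, by
      show pvToggle (pvToggle (pvToggle (pvBitsOfN n) 0) 1) 9 = pvBitsOfN (n ^^^ 515)
      have h := pvTriple_bitsOfN 0 1 9 (by norm_num) (by norm_num) (by norm_num) n
      norm_num at h
      convert h using 2, rfl⟩
  · exact ⟨1030, by
      show pvToggle (pvToggle (pvToggle (pvBitsOfN n) 1) 2) 10 = pvBitsOfN (n ^^^ 1030)
      have h := pvTriple_bitsOfN 1 2 10 (by norm_num) (by norm_num) (by norm_num) n
      norm_num at h
      convert h using 2, rfl⟩
  · exact ⟨2060, by
      show pvToggle (pvToggle (pvToggle (pvBitsOfN n) 2) 3) 11 = pvBitsOfN (n ^^^ 2060)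
      have h := pvTriple_bitsOfN 2 3 11 (by norm_num) (by norm_num) (by norm_num) n
      norm_num at h
      convert h using 2, rfl⟩
  · exact ⟨400, by
      show pvToggle (pvToggle (pvToggle (pvBitsOfN n) 4) 7) 8 = pvBitsOfN (n ^^^ 400)
      have h := pvTriple_bitsOfN 4 7 8 (by norm_num) (by norm_num) (by norm_num) n
      norm_num at h
      convert h using 2, rfl⟩
  · exact ⟨560, by
      show pvToggle (pvToggle (pvToggle (pvBitsOfN n) 4) 5) 9 = pvBitsOfN (n ^^^ 560)
      have h := pvTriple_bitsOfN 4 5 9 (by norm_num) (by norm_num) (by norm_num) n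
      norm_num at h
      convert h using 2, rfl⟩
  · exact ⟨1120, by
      show pvToggle (pvToggle (pvToggle (pvBitsOfN n) 5) 6) 10 = pvBitsOfN (n ^^^ 1120)
      have h := pvTriple_bitsOfN 5 6 10 (by norm_num) (by norm_num) (by norm_num) n
      norm_num at h
      convert h using 2, rfl⟩
  · exact ⟨2240, by
      show pvToggle (pvToggle (pvToggle (pvBitsOfN n) 6) 7) 11 = pvBitsOfN (n ^^^ 2240)
      have h := pvTriple_bitsOfN 6 7 11 (by norm_num) (by norm_num) (by norm_num) n
      norm_num at h
      convert h using 2, rfl⟩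

lemma pvLoop_eq (indices : List Int) (h : ∀ v ∈ indices, PySem.Raise.InRange 8 v) (n : Nat) :
    indices.foldl pvStepA (pvBitsOfN n) = pvUnpack 12 (indices.foldl pvXorStep (n : Int)) := by
  induction indices generalizing n with
  | nil => rw [List.foldl_nil, List.foldl_nil, pvUnpack_natCast]; rfl
  | cons v rest ih =>
    obtain ⟨m, hA, hB⟩ := pvStep_pair v (h v (by simp)) n
    simp only [List.foldl_cons]
    rw [hA, hB]
    exact ih (fun w hw => h w (by simp [hw])) (n ^^^ m)

-- ===== VERDICT (by name: the statement is the Claim_ definition above) =====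
theorem edge_gen_bits_from_vertex_indices_spec : Claim_equal_edge_gen_bits_from_vertex_indices := by
  intro indices _ hpre
  unfold Spec_edge_gen_bits_from_vertex_indices edge_gen_bits_from_vertex_indices
    edge_gen_bits_from_vertex_indices_alt
  have h0 : (List.replicate 12 (0:Int)) = pvBitsOfN 0 := by decide
  have h1 := pvLoop_eq indices hpre 0
  rw [h0, h1, Nat.cast_zero]
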